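-- pv_equiv track=rewrite | github.com/jujumilk3/algorithm-study | Programmers/level1/이상한-문자-만들기.py | solution
-- ===== SOURCE A (Python) =====
-- def solution(s):
--     answer = ''
--     for word in s.split(' '):
--         temp_word = ''
--         for i in range(len(word)):
--             if i % 2:
--                 temp_word += word[i].lower()
--             else:
--                 temp_word += word[i].upper()
--         answer += temp_word
--         answer += ' '
--     return answer[:-1]
-- ===== SOURCE B (Python) =====
-- def solution(s):
--     out = []
--     i = 0
--     for c in s:
--         if c == ' ':
--             out.append(' ')
--             i = 0
--         else:
--             out.append(c.upper() if i % 2 == 0 else c.lower())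
--             i += 1
--     return ''.join(out)
-- ===== Notes on version B (the rewrite author's own statement) =====
-- stated objective: simpler
-- what changed: Replaced split-into-words with a nested per-word index loop and a trailing-space trim by a single pass over the characters that keeps a counter reset on each space.
import Mathlib
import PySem

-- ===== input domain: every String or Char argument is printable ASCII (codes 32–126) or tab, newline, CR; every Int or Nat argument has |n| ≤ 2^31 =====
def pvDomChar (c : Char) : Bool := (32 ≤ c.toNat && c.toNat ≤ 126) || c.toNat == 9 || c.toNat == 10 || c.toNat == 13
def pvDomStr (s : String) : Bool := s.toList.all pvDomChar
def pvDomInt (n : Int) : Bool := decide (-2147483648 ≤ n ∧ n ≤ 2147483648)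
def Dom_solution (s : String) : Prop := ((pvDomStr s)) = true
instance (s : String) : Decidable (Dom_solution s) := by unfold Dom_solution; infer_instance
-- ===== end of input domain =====

-- B replaces A's split-into-words plus nested index loop by a single pass over the
-- characters with a per-word counter that resets on each space (objective: simpler).

-- ===== PORT A =====
-- Literal port of A: split on ' ', per word an index loop i in range(len(word))
-- upper/lower-casing by parity, join with trailing spaces, then answer[:-1].
def solution (s : String) : String :=
  let answer : List Char :=
    (PySem.Chars.splitOn s.toList [' ']).foldl
      (fun answer word =>
        let temp_word : List Char :=
          (PySem.List.pyRange 0 (word.length : Int)).foldl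
            (fun temp i =>
              if PySem.Int.mod i 2 ≠ 0 then
                temp ++ [PySem.Chars.lowerChar (PySem.List.pyGetD word i ' ')]
              else
                temp ++ [PySem.Chars.upperChar (PySem.List.pyGetD word i ' ')])
            []
        (answer ++ temp_word) ++ [' '])
      []
  String.ofList (PySem.List.slice answer none (some (-1)))

-- ===== PORT B =====
-- Literal port of B: one fold over the characters with state (output, counter).
def solution_alt (s : String) : String :=
  let r : List Char × Int :=
    s.toList.foldl
      (fun (st : List Char × Int) c =>
        if c = ' ' then (st.1 ++ [' '], 0)
        else (st.1 ++ [if PySem.Int.mod st.2 2 = 0 then PySem.Chars.upperChar c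
                       else PySem.Chars.lowerChar c], st.2 + 1))
      ([], 0)
  String.ofList r.1

-- ===== PRECONDITION & SPEC =====
def Spec_solution (s : String) (out : String) : Prop := out = solution_alt s
instance (s : String) (out : String) : Decidable (Spec_solution s out) := by unfold Spec_solution; infer_instance

-- ===== CLAIM (what is proved, stated in full; the proofs are below) =====
def Claim_equal_solution : Prop := ∀ (s : String), Dom_solution s → Spec_solution s (solution s)

-- ===== LEMMAS AND PROOFS =====

-- parity transform of one character
def pvTr (i : Int) (c : Char) : Char :=
  if PySem.Int.mod i 2 = 0 then PySem.Chars.upperChar c else PySem.Chars.lowerChar c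

-- index-wise transform of one word, starting at index i
def pvIdxMap (i : Int) : List Char → List Char
  | [] => []
  | c :: cs => pvTr i c :: pvIdxMap (i + 1) cs

-- B's single pass, counter i, reset on space
def pvWalk : List Char → Int → List Char
  | [], _ => []
  | c :: cs, i =>
    if c = ' ' then ' ' :: pvWalk cs 0 else pvTr i c :: pvWalk cs (i + 1)

-- simple split on a single space character
def pvSp : List Char → List (List Char)
  | [] => [[]]
  | c :: cs =>
    if c = ' ' then [] :: pvSp cs
    else
      match pvSp cs with
      | [] => [[c]]
      | w :: ws => (c :: w) :: ws

def pvConsFirst (p : List Char) : List (List Char) → List (List Char)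
  | [] => [p]
  | w :: ws => (p ++ w) :: ws

theorem pvSp_ne_nil (cs : List Char) : pvSp cs ≠ [] := by
  cases cs with
  | nil => simp [pvSp]
  | cons c cs =>
    simp only [pvSp]
    split
    · simp
    · cases pvSp cs <;> simp

theorem pvConsFirst_consFirst (p q : List Char) (ws : List (List Char)) :
    pvConsFirst p (pvConsFirst q ws) = pvConsFirst (p ++ q) ws := by
  cases ws <;> simp [pvConsFirst]

theorem pvGo_eq (fuel : Nat) (l cur : List Char) (acc : List (List Char)) (h : l.length < fuel) :
    PySem.Chars.splitOn.go [' '] fuel l cur acc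
      = acc.reverse ++ pvConsFirst cur.reverse (pvSp l) := by
  induction fuel generalizing l cur acc with
  | zero => omega
  | succ fuel ih =>
    cases l with
    | nil =>
      rw [PySem.Chars.splitOn.go.eq_def]
      simp [pvSp, pvConsFirst]
    | cons c rest =>
      rw [PySem.Chars.splitOn.go.eq_def]
      by_cases hc : c = ' '
      · subst hc
        have hp : List.isPrefixOf [' '] (' ' :: rest) = true := by
          simp [List.isPrefixOf]
        simp only [hp, if_true, List.length_cons, List.drop_succ_cons, List.length_nil,
          List.drop_zero]
        rw [ih rest [] (cur.reverse :: acc) (by simp at h ⊢; omega)]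
        have hne := pvSp_ne_nil rest
        cases hsp : pvSp rest with
        | nil => exact absurd hsp hne
        | cons w ws =>
          simp [pvSp, pvConsFirst, hsp]
      · have hp : List.isPrefixOf [' '] (c :: rest) = false := by
          simp [List.isPrefixOf]
          exact fun h' => hc h'.symm
        simp only [hp, Bool.false_eq_true, if_false]
        rw [ih rest (c :: cur) acc (by simp at h ⊢; omega)]
        have hx : pvSp (c :: rest) = pvConsFirst [c] (pvSp rest) := by
          have hne := pvSp_ne_nil rest
          cases hsp : pvSp rest with
          | nil => exact absurd hsp hne
          | cons w ws => simp [pvSp, pvConsFirst, hsp, hc]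
        rw [hx, pvConsFirst_consFirst]
        simp

theorem pvSplitOn_space (cs : List Char) : PySem.Chars.splitOn cs [' '] = pvSp cs := by
  rw [PySem.Chars.splitOn, pvGo_eq (cs.length + 1) cs [] [] (by omega)]
  have hne := pvSp_ne_nil cs
  cases hsp : pvSp cs with
  | nil => exact absurd hsp hne
  | cons w ws => simp [pvConsFirst]

theorem pvIdxMap_append (i : Int) (w : List Char) (c : Char) :
    pvIdxMap i (w ++ [c]) = pvIdxMap i w ++ [pvTr (i + w.length) c] := by
  induction w generalizing i with
  | nil => simp [pvIdxMap]
  | cons x xs ih =>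
    simp only [List.cons_append, pvIdxMap, ih, List.length_cons]
    have hi : (i + 1) + (xs.length : Int) = i + ((xs.length : Int) + 1) := by ring
    push_cast
    rw [hi]

-- A's inner index loop computes pvIdxMap 0
theorem pvInner_eq (w : List Char) :
    (PySem.List.pyRange 0 (w.length : Int)).foldl
      (fun temp i =>
        if PySem.Int.mod i 2 ≠ 0 then
          temp ++ [PySem.Chars.lowerChar (PySem.List.pyGetD w i ' ')]
        else
          temp ++ [PySem.Chars.upperChar (PySem.List.pyGetD w i ' ')])
      [] = pvIdxMap 0 w := by
  induction w using List.reverseRecOn with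
  | nil => simp [PySem.List.pyRange_one_eq_nil, pvIdxMap]
  | append_singleton xs c ih =>
    have hlen : ((xs ++ [c]).length : Int) = (xs.length : Int) + 1 := by
      simp
    rw [hlen, PySem.List.pyRange_one_succ_right (by positivity), List.foldl_append]
    have hcong :
        (PySem.List.pyRange 0 (xs.length : Int)).foldl
          (fun temp i =>
            if PySem.Int.mod i 2 ≠ 0 then
              temp ++ [PySem.Chars.lowerChar (PySem.List.pyGetD (xs ++ [c]) i ' ')]
            else
              temp ++ [PySem.Chars.upperChar (PySem.List.pyGetD (xs ++ [c]) i ' ')])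
          []
        = (PySem.List.pyRange 0 (xs.length : Int)).foldl
          (fun temp i =>
            if PySem.Int.mod i 2 ≠ 0 then
              temp ++ [PySem.Chars.lowerChar (PySem.List.pyGetD xs i ' ')]
            else
              temp ++ [PySem.Chars.upperChar (PySem.List.pyGetD xs i ' ')])
          [] := by
      apply PySem.List.foldl_congr_mem
      intro acc i hi
      have hib := PySem.List.mem_pyRange_one.mp hi
      have hget : PySem.List.pyGetD (xs ++ [c]) i ' ' = PySem.List.pyGetD xs i ' ' := by
        rw [PySem.List.pyGetD_eq_getElem (xs ++ [c]) ' ' hib.1 (by simp; omega),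
            PySem.List.pyGetD_eq_getElem xs ' ' hib.1 (by exact_mod_cast hib.2)]
        rw [List.getElem_append_left]
      rw [hget]
    rw [hcong, ih, pvIdxMap_append]
    simp only [List.foldl_cons, List.foldl_nil]
    have hgetc : PySem.List.pyGetD (xs ++ [c]) (xs.length : Int) ' ' = c := by
      rw [PySem.List.pyGetD_eq_getElem (xs ++ [c]) ' ' (by positivity) (by simp)]
      simp
    rw [hgetc]
    have hcast : PySem.Int.mod ((xs.length : Int)) 2 = ((xs.length % 2 : Nat) : Int) := by
      exact_mod_cast PySem.Int.mod_natCast xs.length 2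
    simp only [zero_add, pvTr, hcast]
    by_cases hpar : xs.length % 2 = 0
    · simp [hpar]
    · have h1 : xs.length % 2 = 1 := by omega
      simp [h1]

-- the space-joined, index-transformed words are B's single pass plus one trailing space
theorem pvJoin_eq (cs : List Char) (i : Int) (h : List Char) (t : List (List Char))
    (hsp : pvSp cs = h :: t) :
    pvIdxMap i h ++ ' ' :: (t.flatMap (fun w => pvIdxMap 0 w ++ [' ']))
      = pvWalk cs i ++ [' '] := by
  induction cs generalizing i h t with
  | nil =>
    simp only [pvSp, List.cons.injEq] at hsp
    simp [pvIdxMap, pvWalk, ← hsp.1, ← hsp.2]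
  | cons c rest ih =>
    by_cases hc : c = ' '
    · subst hc
      simp only [pvSp] at hsp
      obtain ⟨rfl, rfl⟩ := hsp
      have hne := pvSp_ne_nil rest
      cases hsp' : pvSp rest with
      | nil => exact absurd hsp' hne
      | cons w ws =>
        have hrec := ih 0 w ws hsp'
        simp only [pvIdxMap, List.nil_append, pvWalk, if_true, List.flatMap_cons,
          List.cons_append, List.append_assoc]
        rw [← hrec]
    · have hne := pvSp_ne_nil rest
      cases hsp' : pvSp rest with
      | nil => exact absurd hsp' hne
      | cons w ws =>
        simp only [pvSp, if_neg hc, hsp', List.cons.injEq] at hsp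
        obtain ⟨rfl, rfl⟩ := hsp
        have hrec := ih (i + 1) w ws hsp'
        simp only [pvIdxMap, pvWalk, if_neg hc, List.cons_append]
        rw [hrec]

theorem pvB_fold (cs : List Char) (st : List Char × Int) :
    (cs.foldl
      (fun (st : List Char × Int) c =>
        if c = ' ' then (st.1 ++ [' '], 0)
        else (st.1 ++ [if PySem.Int.mod st.2 2 = 0 then PySem.Chars.upperChar c
                       else PySem.Chars.lowerChar c], st.2 + 1))
      st).1 = st.1 ++ pvWalk cs st.2 := by
  induction cs generalizing st with
  | nil => simp [pvWalk]
  | cons c rest ih =>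
    simp only [List.foldl_cons]
    by_cases hc : c = ' '
    · subst hc
      rw [if_pos rfl, ih]
      simp [pvWalk]
    · rw [if_neg hc, ih]
      simp [pvWalk, pvTr, hc]

theorem pvSlice_dropLast (xs : List Char) :
    PySem.List.slice xs none (some (-1)) = xs.dropLast := by
  simp [PySem.List.slice, PySem.List.clampIdx]
  split_ifs with h
  · simp [h]
  · rw [List.dropLast_eq_take]
    congr 1
    have : xs.length ≠ 0 := by simpa using h
    omega

-- ===== VERDICT (by name: the statement is the Claim_ definition above) =====
theorem solution_spec : Claim_equal_solution := by
  intro s _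
  unfold Spec_solution solution solution_alt
  rw [pvSplitOn_space]
  have hstep :
      (pvSp s.toList).foldl
        (fun answer word =>
          (answer ++
            (PySem.List.pyRange 0 (word.length : Int)).foldl
              (fun temp i =>
                if PySem.Int.mod i 2 ≠ 0 then
                  temp ++ [PySem.Chars.lowerChar (PySem.List.pyGetD word i ' ')]
                else
                  temp ++ [PySem.Chars.upperChar (PySem.List.pyGetD word i ' ')])
              []) ++ [' '])
        []
      = (pvSp s.toList).foldl
        (fun answer word => answer ++ (pvIdxMap 0 word ++ [' '])) [] := by
    apply PySem.List.foldl_congr_mem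
    intro acc w _
    rw [pvInner_eq w, List.append_assoc]
  rw [hstep, PySem.List.foldl_append_eq_flatMap]
  dsimp only
  rw [pvB_fold]
  have hne := pvSp_ne_nil s.toList
  cases hsp : pvSp s.toList with
  | nil => exact absurd hsp hne
  | cons w ws =>
    have hj := pvJoin_eq s.toList 0 w ws hsp
    have hflat : List.flatMap (fun w => pvIdxMap 0 w ++ [' ']) (w :: ws)
        = pvWalk s.toList 0 ++ [' '] := by
      rw [List.flatMap_cons, ← hj]
      simp
    rw [hflat, List.nil_append, List.nil_append, pvSlice_dropLast,
      List.dropLast_concat]
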